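-- pv_equiv track=rewrite | github.com/svmihar/aoc2019 | day16/day16.py | fft_phase
-- ===== SOURCE A (Python) =====
-- def pattern(output_element):
--     while True:
--         for _ in range(output_element):
--             yield 0
--         for _ in range(output_element):
--             yield 1
--         for _ in range(output_element):
--             yield 0
--         for _ in range(output_element):
--             yield -1
--
-- def ones_digit(n):
--     if n > 0:
--         return n % 10
--     else:
--         return (-n) % 10
--
-- def fft_phase(numbers):
--     output = []
--     n = len(numbers)
--     for i in range(n):
--         pat = pattern(i + 1)
--         next(pat)
--
--         values = list(zip(pat, numbers))
--         total = sum(p * n for p, n in values)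
--         output.append(ones_digit(total))
--     return output
-- ===== SOURCE B (Python) =====
-- def fft_phase(numbers):
--     # Prefix sums: each output digit is an alternating sum of block ranges,
--     # O(n log n) instead of A's O(n^2) full weighted sums.
--     n = len(numbers)
--     prefix = [0]
--     for x in numbers:
--         prefix.append(prefix[-1] + x)
--     output = []
--     for k in range(1, n + 1):
--         total = 0
--         sign = 1
--         for start in range(k - 1, n, 2 * k):
--             total += sign * (prefix[min(n, start + k)] - prefix[start])
--             sign = -sign
--         output.append(abs(total) % 10)
--     return output
-- ===== Notes on version B (the rewrite author's own statement) =====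
-- stated objective: faster
-- what changed: Replaces per-output generation of the full pattern and an O(n) weighted sum with one prefix-sum array, so each output digit is an alternating sum over the O(n/k) nonzero blocks of the pattern.
import Mathlib
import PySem

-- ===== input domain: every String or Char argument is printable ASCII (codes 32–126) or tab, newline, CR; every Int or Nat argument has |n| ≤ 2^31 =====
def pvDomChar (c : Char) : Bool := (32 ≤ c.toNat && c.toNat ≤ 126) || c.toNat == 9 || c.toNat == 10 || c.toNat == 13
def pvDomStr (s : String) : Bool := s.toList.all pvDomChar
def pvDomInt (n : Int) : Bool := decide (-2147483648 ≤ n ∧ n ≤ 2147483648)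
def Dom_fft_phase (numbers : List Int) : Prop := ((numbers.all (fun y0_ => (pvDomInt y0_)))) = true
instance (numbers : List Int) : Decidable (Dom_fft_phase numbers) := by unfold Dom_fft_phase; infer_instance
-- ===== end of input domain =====

-- B replaces A's per-output pattern generation and full O(n) weighted sum by one prefix-sum
-- array and an alternating sum over the pattern's nonzero blocks (objective: faster).

-- ===== PORT A =====
-- A's infinite generator `pattern(k)`, rendered as the first m yields: enough copies of its
-- length-4k cycle, truncated to m (the callers consume exactly m = len(numbers)+1 values).
def patternStream (k m : Nat) : List Int :=
  ((List.replicate (m / (4*k) + 1)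
      (List.replicate k (0:Int) ++ List.replicate k 1 ++ List.replicate k 0 ++ List.replicate k (-1))).flatten).take m

def ones_digit (n : Int) : Int :=
  if n > 0 then PySem.Int.mod n 10 else PySem.Int.mod (-n) 10

def fft_phase (numbers : List Int) : List Int :=
  let n := numbers.length
  (List.range n).foldl (fun output i =>
    -- pat = pattern(i + 1); next(pat)  → drop the first yield
    let pat := patternStream (i+1) (n+1)
    let values := List.zip (pat.drop 1) numbers
    let total := (values.map (fun pq => pq.1 * pq.2)).sum
    output ++ [ones_digit total]) []

-- ===== PORT B =====
def fft_phase_alt (numbers : List Int) : List Int :=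
  let n : Int := PySem.List.len numbers
  let pre := numbers.foldl (fun pr y => pr ++ [PySem.List.pyGetD pr (-1) 0 + y]) [(0:Int)]
  (PySem.List.pyRange 1 (n+1) 1).foldl (fun output k =>
    let ts := (PySem.List.pyRange (k-1) n (2*k)).foldl
        (fun (acc : Int × Int) start =>
          (acc.1 + acc.2 * (PySem.List.pyGetD pre (min n (start+k)) 0 - PySem.List.pyGetD pre start 0), -acc.2))
        ((0:Int), (1:Int))
    output ++ [PySem.Int.mod |ts.1| 10]) []

-- ===== PRECONDITION & SPEC =====
def Spec_fft_phase (numbers : List Int) (out : List Int) : Prop := out = fft_phase_alt numbers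
instance (numbers : List Int) (out : List Int) : Decidable (Spec_fft_phase numbers out) := by unfold Spec_fft_phase; infer_instance

-- ===== CLAIM (what is proved, stated in full; the proofs are below) =====
def Claim_equal_fft_phase : Prop := ∀ (numbers : List Int), Dom_fft_phase numbers → Spec_fft_phase numbers (fft_phase numbers)

-- ===== LEMMAS AND PROOFS =====

-- the value of pattern(k)'s cycle at offset r (0 ≤ r < 4k)
def cycVal (k r : Nat) : Int :=
  if r < k then 0 else if r < 2*k then 1 else if r < 3*k then 0 else -1

-- weight of input index j for a block walk that started at index s with sign +1, blocks of
-- length k every 2k positions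
def wgt (k s j : Nat) : Int :=
  if (j - s) % (2*k) < k then (if ((j - s) / (2*k)) % 2 = 0 then 1 else -1) else 0

-- alternating sum  f s₀ - (f s₁ - (f s₂ - …))
def altSum (f : Int → Int) : List Int → Int
  | [] => 0
  | s :: l => f s - altSum f l

lemma ones_digit_abs (t : Int) : ones_digit t = PySem.Int.mod |t| 10 := by
  unfold ones_digit
  split_ifs with h
  · rw [abs_of_pos h]
  · rw [abs_of_nonpos (by omega)]


lemma sum_take (x : List Int) (m : Nat) :
    (x.take m).sum = ∑ j ∈ Finset.range m, x.getD j 0 := by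
  induction x generalizing m with
  | nil => simp
  | cons a t ih =>
    cases m with
    | zero => simp
    | succ s =>
      rw [List.take_succ_cons, List.sum_cons, ih, Finset.sum_range_succ']
      simp [add_comm]


lemma build_pre (x : List Int) :
    x.foldl (fun pr y => pr ++ [PySem.List.pyGetD pr (-1) 0 + y]) [(0:Int)]
      = (List.range (x.length+1)).map (fun m => (x.take m).sum) := by
  induction x using List.reverseRecOn with
  | nil => simp
  | append_singleton x y ih =>
    rw [List.foldl_append, List.foldl_cons, List.foldl_nil, ih]
    have hne : ((List.range (x.length+1)).map (fun m => (x.take m).sum)) ≠ [] := by simp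
    rw [PySem.List.pyGetD_neg_one _ _ hne]
    have hlast : ((List.range (x.length+1)).map (fun m => (x.take m).sum)).getLast hne = x.sum := by
      rw [List.getLast_eq_getElem]
      simp only [List.length_map, List.length_range, Nat.add_sub_cancel]
      rw [List.getElem_map, List.getElem_range]
      simp
    rw [hlast, List.length_append, List.length_singleton]
    conv_rhs => rw [List.range_succ, List.map_append]
    congr 1
    · apply List.map_congr_left
      intro m hm
      simp only [List.mem_range] at hm
      rw [List.take_append_of_le_length (by omega)]
    · simp only [List.map_cons, List.map_nil]
      have : (x ++ [y]).take (x.length + 1) = x ++ [y] := List.take_of_length_le (by simp)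
      rw [this]
      simp


lemma pre_getD (x : List Int) (m : Nat) (hm : m ≤ x.length) :
    PySem.List.pyGetD (x.foldl (fun pr y => pr ++ [PySem.List.pyGetD pr (-1) 0 + y]) [(0:Int)]) (m : Int) 0
      = ∑ j ∈ Finset.range m, x.getD j 0 := by
  rw [build_pre, PySem.List.pyGetD_natCast]
  rw [List.getD_eq_getElem _ _ (by simp; omega)]
  rw [List.getElem_map, List.getElem_range]
  exact sum_take x m


lemma flatten_replicate_getD (c : List Int) (r t : Nat) (h : t < r * c.length) :
    (List.replicate r c).flatten.getD t 0 = c.getD (t % c.length) 0 := by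
  induction r generalizing t with
  | zero => omega
  | succ r ih =>
    rw [List.replicate_succ, List.flatten_cons]
    have hc : 0 < c.length := by by_contra hc; simp at hc; simp [hc] at h
    by_cases ht : t < c.length
    · rw [List.getD_append _ _ _ _ ht, Nat.mod_eq_of_lt ht]
    · have he : t = c.length + (t - c.length) := by omega
      rw [he, List.getD_append_right _ _ _ _ (by omega)]
      rw [Nat.add_sub_cancel_left, Nat.add_mod_left]
      have hsm : (r+1) * c.length = r * c.length + c.length := by ring
      exact ih _ (by omega)

lemma cyc_getD (k r : Nat) (h : r < 4*k) :
    (List.replicate k (0:Int) ++ List.replicate k 1 ++ List.replicate k 0 ++ List.replicate k (-1)).getD r 0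
      = cycVal k r := by
  unfold cycVal
  split_ifs with h1 h2 h3
  · rw [List.getD_append _ _ _ _ (by simp; omega)]
    rw [List.getD_append _ _ _ _ (by simp; omega)]
    rw [List.getD_append _ _ _ _ (by simp; omega)]
    simp [h1]
  · rw [List.getD_append _ _ _ _ (by simp; omega)]
    rw [List.getD_append _ _ _ _ (by simp; omega)]
    rw [List.getD_append_right _ _ _ _ (by simp; omega)]
    simp only [List.length_replicate]
    rw [List.getD_eq_getElem _ _ (by simp; omega)]
    simp
  · rw [List.getD_append _ _ _ _ (by simp; omega)]
    rw [List.getD_append_right _ _ _ _ (by simp; omega)]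
    simp only [List.length_append, List.length_replicate]
    rw [List.getD_eq_getElem _ _ (by simp; omega)]
    simp
  · rw [List.getD_append_right _ _ _ _ (by simp; omega)]
    simp only [List.length_append, List.length_replicate]
    rw [List.getD_eq_getElem _ _ (by simp; omega)]
    simp


lemma patternStream_getD (k m j : Nat) (hk : 1 ≤ k) (hj : j < m) :
    (patternStream k m).getD j 0 = cycVal k (j % (4*k)) := by
  unfold patternStream
  set c := List.replicate k (0:Int) ++ List.replicate k 1 ++ List.replicate k 0 ++ List.replicate k (-1) with hc
  have hlen : c.length = 4*k := by simp [hc]; ring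
  have hbig : m < (m / (4*k) + 1) * c.length := by
    rw [hlen]
    have h1 := Nat.div_add_mod m (4*k)
    have h2 : m % (4*k) < 4*k := Nat.mod_lt _ (by omega)
    have h3 : (m / (4*k) + 1) * (4*k) = 4*k * (m / (4*k)) + 4*k := by ring
    omega
  rw [List.getD_eq_getElem?_getD, List.getElem?_take_of_lt hj, ← List.getD_eq_getElem?_getD]
  rw [flatten_replicate_getD c _ j (by omega), hlen]
  exact cyc_getD k _ (Nat.mod_lt _ (by omega))


lemma zip_mul_sum (l x : List Int) (h : x.length ≤ l.length) :
    ((l.zip x).map (fun pq => pq.1 * pq.2)).sum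
      = ∑ j ∈ Finset.range x.length, l.getD j 0 * x.getD j 0 := by
  induction x generalizing l with
  | nil => simp
  | cons a t ih =>
    cases l with
    | nil => simp at h
    | cons b s =>
      simp only [List.zip_cons_cons, List.map_cons, List.sum_cons, List.length_cons]
      rw [ih s (by simpa using h), Finset.sum_range_succ']
      simp [add_comm]


lemma foldl_alt (f : Int → Int) (l : List Int) (a σ : Int) :
    (l.foldl (fun (acc : Int × Int) s => (acc.1 + acc.2 * f s, -acc.2)) (a, σ)).1
      = a + σ * altSum f l := by
  induction l generalizing a σ with
  | nil => simp [altSum]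
  | cons s t ih =>
    simp only [List.foldl_cons, altSum]
    rw [ih]
    ring


lemma pyRange_pos_nil (a b st : Int) (hst : 0 < st) (h : b ≤ a) :
    PySem.List.pyRange a b st = [] := by
  rw [PySem.List.pyRange_of_pos a b hst]
  simp [show ¬ a < b by omega]


lemma pyRange_pos_cons (a b st : Int) (hst : 0 < st) (h : a < b) :
    PySem.List.pyRange a b st = a :: PySem.List.pyRange (a + st) b st := by
  rw [PySem.List.pyRange_of_pos a b hst, PySem.List.pyRange_of_pos (a+st) b hst]
  have hd : (b - a + st - 1) / st = (b - a - 1) / st + 1 := by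
    have := Int.add_mul_ediv_right (b - a - 1) 1 (by omega : st ≠ 0)
    rw [show b - a + st - 1 = b - a - 1 + 1 * st by ring, this]
  have hnn : 0 ≤ (b - a - 1) / st := Int.ediv_nonneg (by omega) (by omega)
  by_cases h2 : a + st < b
  · have hcnt2 : b - (a + st) + st - 1 = b - a - 1 := by ring
    rw [if_pos h, if_pos h2, hcnt2, hd]
    rw [show ((b-a-1)/st + 1).toNat = ((b-a-1)/st).toNat + 1 by omega]
    rw [List.range_succ_eq_map]
    simp only [List.map_cons, List.map_map]
    simp only [Nat.cast_zero, mul_zero, add_zero]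
    congr 1
    apply List.map_congr_left
    intro k _
    simp only [Function.comp_apply]
    push_cast
    ring
  · rw [if_pos h, if_neg h2, hd]
    have hz : (b - a - 1) / st = 0 := by
      apply Int.ediv_eq_zero_of_lt (by omega) (by omega)
    rw [hz]
    simp


lemma cycVal_eq_wgt (k j : Nat) (hk : 1 ≤ k) :
    cycVal k ((j+1) % (4*k)) = if j < k - 1 then 0 else wgt k (k-1) j := by
  by_cases hj : j < k - 1
  · rw [if_pos hj]
    unfold cycVal
    rw [Nat.mod_eq_of_lt (by omega)]
    simp [show j + 1 < k by omega]
  · rw [if_neg hj]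
    set r := j - (k-1) with hrdef
    have hj1 : j + 1 = k + r := by omega
    have hrm : r = 2*k * (r / (2*k)) + r % (2*k) := (Nat.div_add_mod r (2*k)).symm
    set q := r / (2*k)
    set rem := r % (2*k)
    have hrem : rem < 2*k := Nat.mod_lt _ (by omega)
    unfold wgt cycVal
    rw [show j - (k-1) = r from rfl]
    rcases Nat.even_or_odd q with ⟨u, hu⟩ | ⟨u, hu⟩
    · have hq2 : q % 2 = 0 := by omega
      have hmod : (j+1) % (4*k) = k + rem := by
        rw [hj1, hrm, hu]
        rw [show k + (2*k*(u+u) + rem) = (k + rem) + u * (4*k) by ring]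
        rw [Nat.add_mul_mod_self_right, Nat.mod_eq_of_lt (by omega)]
      rw [hmod, hq2]
      split_ifs <;> first | rfl | omega
    · have hq2 : q % 2 = 1 := by omega
      have hmod : (j+1) % (4*k) = if rem < k then 3*k + rem else rem - k := by
        rw [hj1, hrm, hu]
        by_cases hrk : rem < k
        · rw [if_pos hrk]
          rw [show k + (2*k*(2*u+1) + rem) = (3*k + rem) + u * (4*k) by ring]
          rw [Nat.add_mul_mod_self_right, Nat.mod_eq_of_lt (by omega)]
        · rw [if_neg hrk]
          rw [show k + (2*k*(2*u+1) + rem) = (3*k + rem) + u * (4*k) by ring]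
          rw [Nat.add_mul_mod_self_right, show 3*k + rem = (rem - k) + 4*k by omega]
          rw [Nat.add_mod_right, Nat.mod_eq_of_lt (by omega)]
      rw [hmod, hq2]
      by_cases hrk : rem < k
      · rw [if_pos hrk]
        split_ifs <;> first | rfl | omega
      · rw [if_neg hrk]
        split_ifs <;> first | rfl | omega


lemma wgt_in_first (k s j : Nat) (h1 : s ≤ j) (h2 : j < s + k) : wgt k s j = 1 := by
  unfold wgt
  have hr : j - s < k := by omega
  rw [Nat.mod_eq_of_lt (by omega), Nat.div_eq_of_lt (by omega)]
  simp [hr]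


lemma wgt_in_gap (k s j : Nat) (h1 : s + k ≤ j) (h2 : j < s + 2*k) (hk : 1 ≤ k) : wgt k s j = 0 := by
  unfold wgt
  rw [Nat.mod_eq_of_lt (by omega)]
  simp [show ¬ (j - s < k) by omega]


lemma wgt_shift (k s j : Nat) (h : s + 2*k ≤ j) (hk : 1 ≤ k) : wgt k s j = - wgt k (s + 2*k) j := by
  unfold wgt
  have he : j - s = (j - (s + 2*k)) + 2*k := by omega
  rw [he, Nat.add_mod_right, Nat.add_div_right _ (by omega)]
  split_ifs <;> omega


-- the core identity: the alternating block sum over B's range equals the weighted sum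
lemma main_blocks (x : List Int) (k : Nat) (hk : 1 ≤ k) :
    ∀ (fuel s : Nat), x.length - s ≤ fuel →
    altSum (fun sI =>
        PySem.List.pyGetD (x.foldl (fun pr y => pr ++ [PySem.List.pyGetD pr (-1) 0 + y]) [(0:Int)])
            (min (x.length : Int) (sI + (k:Int))) 0
          - PySem.List.pyGetD (x.foldl (fun pr y => pr ++ [PySem.List.pyGetD pr (-1) 0 + y]) [(0:Int)]) sI 0)
      (PySem.List.pyRange (s : Int) (x.length : Int) (2*(k:Int)))
      = ∑ j ∈ Finset.Ico s x.length, wgt k s j * x.getD j 0 := by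
  intro fuel
  induction fuel with
  | zero =>
    intro s hs
    have hsn : x.length ≤ s := by omega
    rw [pyRange_pos_nil _ _ _ (by positivity) (by exact_mod_cast hsn)]
    rw [Finset.Ico_eq_empty (by omega)]
    simp [altSum]
  | succ f ih =>
    intro s hs
    by_cases hsn : s < x.length
    · rw [pyRange_pos_cons _ _ _ (by positivity) (by exact_mod_cast hsn)]
      simp only [altSum]
      rw [show ((s:Int) + 2*(k:Int)) = ((s + 2*k : Nat) : Int) by push_cast; ring]
      rw [ih (s + 2*k) (by omega)]
      set m1 := min x.length (s + k) with hm1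
      set m2 := min x.length (s + 2*k) with hm2
      have hmin : (min ((x.length:Nat) : Int) ((s:Int) + (k:Int))) = ((m1 : Nat) : Int) := by
        rw [hm1]; omega
      rw [hmin, pre_getD x m1 (by omega), pre_getD x s (by omega)]
      have hblock : ∑ j ∈ Finset.range m1, x.getD j 0 - ∑ j ∈ Finset.range s, x.getD j 0
          = ∑ j ∈ Finset.Ico s m1, x.getD j 0 := by
        rw [Finset.sum_Ico_eq_sub _ (by omega)]
      rw [hblock]
      have hsplit2 : Finset.Ico (s + 2*k) x.length = Finset.Ico m2 x.length := by
        ext j; simp only [Finset.mem_Ico]; omega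
      rw [hsplit2]
      rw [← Finset.sum_Ico_consecutive (fun j => wgt k s j * x.getD j 0)
            (show s ≤ m2 by omega) (show m2 ≤ x.length by omega)]
      rw [← Finset.sum_Ico_consecutive (fun j => wgt k s j * x.getD j 0)
            (show s ≤ m1 by omega) (show m1 ≤ m2 by omega)]
      have hp1 : ∑ j ∈ Finset.Ico s m1, wgt k s j * x.getD j 0
          = ∑ j ∈ Finset.Ico s m1, x.getD j 0 := by
        apply Finset.sum_congr rfl
        intro j hj
        simp only [Finset.mem_Ico] at hj
        rw [wgt_in_first k s j (by omega) (by omega), one_mul]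
      have hp2 : ∑ j ∈ Finset.Ico m1 m2, wgt k s j * x.getD j 0 = 0 := by
        apply Finset.sum_eq_zero
        intro j hj
        simp only [Finset.mem_Ico] at hj
        rw [wgt_in_gap k s j (by omega) (by omega) hk, zero_mul]
      have hp3 : ∑ j ∈ Finset.Ico m2 x.length, wgt k s j * x.getD j 0
          = - ∑ j ∈ Finset.Ico m2 x.length, wgt k (s + 2*k) j * x.getD j 0 := by
        rw [← Finset.sum_neg_distrib]
        apply Finset.sum_congr rfl
        intro j hj
        simp only [Finset.mem_Ico] at hj
        rw [wgt_shift k s j (by omega) hk]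
        ring
      rw [hp1, hp2, hp3]
      ring
    · rw [pyRange_pos_nil _ _ _ (by positivity) (by exact_mod_cast (by omega : x.length ≤ s))]
      rw [Finset.Ico_eq_empty (by omega)]
      simp [altSum]

-- ===== VERDICT (by name: the statement is the Claim_ definition above) =====
lemma patternStream_length (k m : Nat) (hk : 1 ≤ k) : (patternStream k m).length = m := by
  unfold patternStream
  rw [List.length_take]
  apply min_eq_left
  simp only [List.length_flatten, List.map_replicate, List.sum_replicate, smul_eq_mul,
    List.length_append, List.length_replicate]
  have h1 := Nat.div_add_mod m (4*k)
  have h2 : m % (4*k) < 4*k := Nat.mod_lt _ (by omega)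
  have h3 : (m / (4*k) + 1) * (k + k + k + k) = 4*k * (m / (4*k)) + 4*k := by ring
  omega

theorem fft_phase_spec : Claim_equal_fft_phase := by
  unfold Claim_equal_fft_phase
  intro x _
  unfold Spec_fft_phase
  simp only [fft_phase, fft_phase_alt, PySem.List.len_eq]
  rw [PySem.List.foldl_append_singleton_eq_map]
  rw [PySem.List.pyRange_one]
  rw [show ((x.length:Int) + 1 - 1) = (x.length:Int) by ring, Int.toNat_natCast]
  rw [List.foldl_map, PySem.List.foldl_append_singleton_eq_map]
  simp only [List.nil_append]
  apply List.map_congr_left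
  intro i hi
  simp only [List.mem_range] at hi
  rw [ones_digit_abs]
  rw [foldl_alt]
  rw [show ((1:Int) + (i:Int)) = ((i+1:Nat):Int) by push_cast; ring]
  rw [show (((i+1:Nat):Int) - 1) = ((i:Nat):Int) by push_cast; ring]
  rw [main_blocks x (i+1) (by omega) x.length i (by omega)]
  rw [zip_mul_sum _ x (by rw [List.length_drop, patternStream_length _ _ (by omega)]; omega)]
  have hstep : ∀ j, j < x.length → ((patternStream (i+1) (x.length+1)).drop 1).getD j 0
      = if j < i then 0 else wgt (i+1) i j := by
    intro j hj
    rw [List.getD_eq_getElem?_getD, List.getElem?_drop, ← List.getD_eq_getElem?_getD]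
    rw [patternStream_getD (i+1) (x.length+1) (1+j) (by omega) (by omega)]
    have hc := cycVal_eq_wgt (i+1) j (by omega)
    simp only [Nat.add_sub_cancel] at hc
    rw [show 1 + j = j + 1 by ring, hc]
  have hS : ∑ j ∈ Finset.range x.length, ((patternStream (i+1) (x.length+1)).drop 1).getD j 0 * x.getD j 0
      = ∑ j ∈ Finset.Ico i x.length, wgt (i+1) i j * x.getD j 0 := by
    rw [Finset.range_eq_Ico, ← Finset.sum_Ico_consecutive _ (Nat.zero_le i) (le_of_lt hi)]
    have h0 : ∑ j ∈ Finset.Ico 0 i, ((patternStream (i+1) (x.length+1)).drop 1).getD j 0 * x.getD j 0 = 0 := by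
      apply Finset.sum_eq_zero
      intro j hj
      simp only [Finset.mem_Ico] at hj
      rw [hstep j (by omega), if_pos (by omega), zero_mul]
    rw [h0, zero_add]
    apply Finset.sum_congr rfl
    intro j hj
    simp only [Finset.mem_Ico] at hj
    rw [hstep j (by omega), if_neg (by omega)]
  rw [hS]
  ring_nf
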